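-- pv_equiv track=rewrite | github.com/RayPals/Claro | Claro.py | find_corresponding_else_or_end
-- ===== SOURCE A (Python) =====
-- from typing import List, Dict, Tuple, Any
--
-- class ClaroError(Exception):
--     """Base error class for Claro interpreter"""
--     def __init__(self, message, line_number):
--         self.message = f"Error on line {line_number}: {message}"
--         self.line_number = line_number
--         super().__init__(self.message)
--
-- def find_corresponding_else_or_end(start_line: int, lines: List[str]) -> int:
--     """Find the corresponding ELSE or END statement"""
--     nested_if_count = 0
--     for i in range(start_line, len(lines)):
--         words = lines[i].split()
--         if words[0].upper() == 'IF':
--             nested_if_count += 1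
--         elif words[0].upper() == 'END':
--             if nested_if_count == 0:
--                 return i
--             nested_if_count -= 1
--         elif words[0].upper() == 'ELSE' and nested_if_count == 0:
--             return i
--     raise ClaroError("No corresponding ELSE or END found", start_line)
-- ===== SOURCE B (Python) =====
-- from typing import List
--
-- class ClaroError(Exception):
--     """Base error class for Claro interpreter"""
--     def __init__(self, message, line_number):
--         self.message = f"Error on line {line_number}: {message}"
--         self.line_number = line_number
--         super().__init__(self.message)
--
-- def _skip_block(i, n, lines, start_line):
--     """Consume a nested IF block from the line after its IF; return the index of its END."""
--     while i < n:
--         word = lines[i].split()[0].upper()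
--         if word == 'IF':
--             i = _skip_block(i + 1, n, lines, start_line) + 1
--         elif word == 'END':
--             return i
--         else:
--             i += 1
--     raise ClaroError("No corresponding ELSE or END found", start_line)
--
-- def find_corresponding_else_or_end(start_line: int, lines: List[str]) -> int:
--     """Find the corresponding ELSE or END statement (recursive descent over nested blocks)"""
--     n = len(lines)
--     i = start_line
--     while i < n:
--         word = lines[i].split()[0].upper()
--         if word == 'IF':
--             i = _skip_block(i + 1, n, lines, start_line) + 1
--         elif word in ('END', 'ELSE'):
--             return i
--         else:
--             i += 1
--     raise ClaroError("No corresponding ELSE or END found", start_line)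
-- ===== Notes on version B (the rewrite author's own statement) =====
-- stated objective: alternative
-- what changed: Replaces A's flat scan with a nested_if_count depth counter by recursive descent: a helper recursively consumes each nested IF..END block (ignoring interior ELSE) and the top-level scan only ever sees depth-0 delimiters; Pre_ excludes exactly the inputs where A raises (IndexError on a blank/whitespace-only line reached by the scan, or ClaroError when no matching ELSE/END exists).
import Mathlib
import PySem

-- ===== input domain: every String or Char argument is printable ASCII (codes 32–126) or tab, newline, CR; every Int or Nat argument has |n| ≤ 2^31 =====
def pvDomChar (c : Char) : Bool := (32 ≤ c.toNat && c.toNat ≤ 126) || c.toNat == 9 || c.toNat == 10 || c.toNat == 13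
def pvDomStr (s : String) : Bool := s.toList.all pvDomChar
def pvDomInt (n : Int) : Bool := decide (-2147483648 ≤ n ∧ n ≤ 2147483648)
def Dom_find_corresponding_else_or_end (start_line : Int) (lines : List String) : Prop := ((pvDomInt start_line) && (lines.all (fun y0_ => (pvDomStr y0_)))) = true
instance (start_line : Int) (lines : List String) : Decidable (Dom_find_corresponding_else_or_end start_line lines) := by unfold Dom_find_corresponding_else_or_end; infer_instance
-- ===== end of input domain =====

-- B re-implements the search by recursive descent over nested IF blocks instead of A's flat
-- scan with a depth counter; same O(n) cost, objective: alternative decomposition.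
-- Both Pythons raise (IndexError on a blank line, ClaroError when no delimiter is found);
-- Pre_ admits exactly the inputs where A returns, and 'none' in the ports encodes a raise.

-- ===== PORT A =====
-- shared helper: lines[i].split()[0].upper(); none = IndexError (bad index or empty split)
def pvWord? (lines : List String) (i : Int) : Option String :=
  match PySem.List.pyGet? lines i with
  | none => none
  | some s =>
    match PySem.Str.split₀ s with
    | [] => none
    | w :: _ => some (PySem.Str.upper w)

-- A's for-loop over range(start_line, len(lines)) carrying nested_if_count c;
-- fuel = number of remaining iterations + 1 (always sufficient); none = a raise.
def pvALoop (lines : List String) (n : Int) (i : Int) (c : Int) : Nat → Option Int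
  | 0 => none
  | f+1 =>
    if i < n then
      match pvWord? lines i with
      | none => none
      | some u =>
        if u = "IF" then pvALoop lines n (i+1) (c+1) f
        else if u = "END" then
          (if c = 0 then some i else pvALoop lines n (i+1) (c-1) f)
        else if u = "ELSE" ∧ c = 0 then some i
        else pvALoop lines n (i+1) c f
    else none

def find_corresponding_else_or_end (start_line : Int) (lines : List String) : Int :=
  (pvALoop lines lines.length start_line 0 ((lines.length - start_line).toNat + 1)).getD (-1)

-- ===== PORT B =====
-- Source B's _skip_block: consume a nested IF block from the line after its IF,
-- returning the index of its matching END; interior ELSE is an ordinary line here.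
def pvSkip (lines : List String) (n : Int) : Int → Nat → Option Int
  | _, 0 => none
  | i, f+1 =>
    if i < n then
      match pvWord? lines i with
      | none => none
      | some u =>
        if u = "IF" then
          match pvSkip lines n (i+1) f with
          | none => none
          | some e => pvSkip lines n (e+1) f
        else if u = "END" then some i
        else pvSkip lines n (i+1) f
    else none

-- Source B's top-level while-loop: depth-0 scan that jumps over whole nested blocks.
def pvScan (lines : List String) (n : Int) : Int → Nat → Option Int
  | _, 0 => none
  | i, f+1 =>
    if i < n then
      match pvWord? lines i with
      | none => none
      | some u =>
        if u = "IF" then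
          match pvSkip lines n (i+1) f with
          | none => none
          | some e => pvScan lines n (e+1) f
        else if u = "END" ∨ u = "ELSE" then some i
        else pvScan lines n (i+1) f
    else none

def find_corresponding_else_or_end_alt (start_line : Int) (lines : List String) : Int :=
  (pvScan lines lines.length start_line ((lines.length - start_line).toNat + 1)).getD (-1)

-- ===== PRECONDITION & SPEC =====
-- +1 for IF, -1 for END over lines[a..b) (the depth A's counter reaches)
def pvBal (lines : List String) (a b : Int) : Int :=
  ((PySem.List.pyRange a b 1).map (fun k =>
    if pvWord? lines k = some "IF" then (1 : Int)
    else if pvWord? lines k = some "END" then -1 else 0)).sum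

-- line j is a depth-0 END/ELSE for a scan that started at s
def pvStop (lines : List String) (s j : Int) : Bool :=
  (pvWord? lines j == some "END" || pvWord? lines j == some "ELSE") && (pvBal lines s j == 0)

-- clamp a start below -len(lines) (whose very first index access raises) to an empty range
def pvStart (start_line : Int) (n : Int) : Int := if start_line < -n then n else start_line

-- Pre_ = exactly the inputs on which A returns: some line j of the scanned range is a
-- depth-0 END/ELSE, and every earlier scanned line has a first word and is not itself a stop.
def Pre_find_corresponding_else_or_end (start_line : Int) (lines : List String) : Prop :=
  ∃ j ∈ PySem.List.pyRange (pvStart start_line lines.length) lines.length 1,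
    pvStop lines (pvStart start_line lines.length) j = true ∧
    ∀ k ∈ PySem.List.pyRange (pvStart start_line lines.length) j 1,
      pvWord? lines k ≠ none ∧ pvStop lines (pvStart start_line lines.length) k = false
instance (start_line : Int) (lines : List String) : Decidable (Pre_find_corresponding_else_or_end start_line lines) := by
  unfold Pre_find_corresponding_else_or_end; infer_instance

def pvWitness_find_corresponding_else_or_end : Int × List String := (0, ["IF x", "PRINT y", "END", "END"])

def Spec_find_corresponding_else_or_end (start_line : Int) (lines : List String) (out : Int) : Prop := out = find_corresponding_else_or_end_alt start_line lines
instance (start_line : Int) (lines : List String) (out : Int) : Decidable (Spec_find_corresponding_else_or_end start_line lines out) := by unfold Spec_find_corresponding_else_or_end; infer_instance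

-- ===== CLAIM (what is proved, stated in full; the proofs are below) =====
def Claim_equal_find_corresponding_else_or_end : Prop := ∀ (start_line : Int) (lines : List String), Dom_find_corresponding_else_or_end start_line lines → Pre_find_corresponding_else_or_end start_line lines → Spec_find_corresponding_else_or_end start_line lines (find_corresponding_else_or_end start_line lines)

-- ===== LEMMAS AND PROOFS =====

theorem pvSkip_some_bounds (lines : List String) (n : Int) :
    ∀ (f : Nat) (i e : Int), pvSkip lines n i f = some e → i ≤ e ∧ e < n := by
  intro f
  induction f with
  | zero => intro i e h; simp [pvSkip] at h
  | succ f ih =>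
    intro i e h
    simp only [pvSkip] at h
    by_cases hin : i < n
    · simp only [hin, if_pos] at h
      cases hw : pvWord? lines i with
      | none => simp [hw] at h
      | some u =>
        simp only [hw] at h
        by_cases hIF : u = "IF"
        · simp only [hIF, if_pos] at h
          cases hs : pvSkip lines n (i+1) f with
          | none => simp [hs] at h
          | some e1 =>
            simp only [hs] at h
            have h1 := ih _ _ hs
            have h2 := ih _ _ h
            omega
        · by_cases hEND : u = "END"
          · simp only [hEND, if_pos] at h
            cases h; omega
          · simp only [hIF, hEND, reduceIte] at h
            have := ih _ _ h
            omega
    · simp [hin] at h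

theorem pvALoop_fuel_irrel (lines : List String) (n : Int) :
    ∀ (f f' : Nat) (i c : Int), (n - i).toNat < f → (n - i).toNat < f' →
      pvALoop lines n i c f = pvALoop lines n i c f' := by
  intro f
  induction f with
  | zero => intro f' i c h h'; omega
  | succ f ih =>
    intro f' i c h h'
    cases f' with
    | zero => omega
    | succ f' =>
      simp only [pvALoop]
      by_cases hin : i < n
      · simp only [hin, if_pos]
        cases hw : pvWord? lines i with
        | none => rfl
        | some u =>
          by_cases hIF : u = "IF"
          · simp only [hIF, if_pos]
            exact ih f' (i+1) (c+1) (by omega) (by omega)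
          · by_cases hEND : u = "END"
            · by_cases hc : c = 0
              · simp [hEND, hc]
              · simp only [hEND, hc, reduceIte]
                exact ih f' (i+1) (c-1) (by omega) (by omega)
            · by_cases hE : u = "ELSE" ∧ c = 0
              · simp [hE]
              · simp only [hIF, hEND, hE, reduceIte]
                exact ih f' (i+1) c (by omega) (by omega)
      · simp [hin]

theorem pvALoop_succ_skip (lines : List String) (n : Int) :
    ∀ (f : Nat) (i c : Int), (n - i).toNat < f → 0 ≤ c →
      pvALoop lines n i (c+1) f =
        (pvSkip lines n i f).bind (fun e => pvALoop lines n (e+1) c f) := by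
  intro f
  induction f with
  | zero => intro i c h _; omega
  | succ f ih =>
    intro i c h hc
    simp only [pvALoop, pvSkip]
    by_cases hin : i < n
    · simp only [hin, if_pos]
      cases hw : pvWord? lines i with
      | none => rfl
      | some u =>
        by_cases hIF : u = "IF"
        · simp only [hIF, if_pos]
          have h1 : pvALoop lines n (i+1) (c+1+1) f =
              (pvSkip lines n (i+1) f).bind (fun e => pvALoop lines n (e+1) (c+1) f) :=
            ih (i+1) (c+1) (by omega) (by omega)
          rw [h1]
          cases he : pvSkip lines n (i+1) f with
          | none => rfl
          | some e =>
            have hb := pvSkip_some_bounds lines n f _ _ he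
            simp only [Option.bind_some]
            rw [ih (e+1) c (by omega) hc]
            cases he2 : pvSkip lines n (e+1) f with
            | none => rfl
            | some e2 =>
              have hb2 := pvSkip_some_bounds lines n f _ _ he2
              simp only [Option.bind_some]
              exact pvALoop_fuel_irrel lines n f (f+1) (e2+1) c (by omega) (by omega)
        · by_cases hEND : u = "END"
          · have hc1 : ¬ (c + 1 = 0) := by omega
            simp only [hEND, hc1, reduceIte]
            have h3 : c + 1 - 1 = c := by ring
            rw [h3]
            exact pvALoop_fuel_irrel lines n f (f+1) (i+1) c (by omega) (by omega)
          · have hE : ¬ (u = "ELSE" ∧ c + 1 = 0) := by rintro ⟨_, h⟩; omega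
            simp only [hIF, hEND, hE, reduceIte]
            rw [ih (i+1) c (by omega) hc]
            cases he : pvSkip lines n (i+1) f with
            | none => rfl
            | some e =>
              have hb := pvSkip_some_bounds lines n f _ _ he
              simp only [Option.bind_some]
              exact pvALoop_fuel_irrel lines n f (f+1) (e+1) c (by omega) (by omega)
    · simp [hin]

theorem pvALoop_eq_pvScan (lines : List String) (n : Int) :
    ∀ (f : Nat) (i : Int), (n - i).toNat < f →
      pvALoop lines n i 0 f = pvScan lines n i f := by
  intro f
  induction f with
  | zero => intro i h; omega
  | succ f ih =>
    intro i h
    simp only [pvALoop, pvScan]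
    by_cases hin : i < n
    · simp only [hin, if_pos]
      cases hw : pvWord? lines i with
      | none => rfl
      | some u =>
        by_cases hIF : u = "IF"
        · simp only [hIF, if_pos]
          rw [pvALoop_succ_skip lines n f (i+1) 0 (by omega) (by omega)]
          cases he : pvSkip lines n (i+1) f with
          | none => rfl
          | some e =>
            have hb := pvSkip_some_bounds lines n f _ _ he
            simp only [Option.bind_some]
            exact ih (e+1) (by omega)
        · by_cases hEND : u = "END"
          · simp [hEND]
          · by_cases hE : u = "ELSE"
            · simp [hE]
            · simp only [hIF, hEND, hE, false_and, false_or, if_false]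
              exact ih (i+1) (by omega)
    · simp [hin]

-- ===== VERDICT (by name: the statement is the Claim_ definition above) =====
theorem find_corresponding_else_or_end_spec : Claim_equal_find_corresponding_else_or_end := by
  intro start_line lines _ _
  unfold Spec_find_corresponding_else_or_end
  unfold find_corresponding_else_or_end find_corresponding_else_or_end_alt
  rw [pvALoop_eq_pvScan lines lines.length _ start_line (by omega)]
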